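-- pv_equiv track=rewrite | github.com/S-Sebb/FinalYearProject | utils.py | make_section_dict
-- ===== SOURCE A (Python) =====
-- def make_section_dict(paragraphs, labels):
--     section_dict = {}
--     for paragraph, label in zip(paragraphs, labels):
--         if label not in section_dict:
--             section_dict[label] = paragraph
--         else:
--             section_dict[label] += "\n\n" + paragraph
--     return section_dict
-- ===== SOURCE B (Python) =====
-- def make_section_dict(paragraphs, labels):
--     pairs = list(zip(paragraphs, labels))
--     order = list(dict.fromkeys(lab for _, lab in pairs))
--     return {lab: "\n\n".join(p for p, l in pairs if l == lab) for lab in order}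
-- ===== Notes on version B (the rewrite author's own statement) =====
-- stated objective: alternative
-- what changed: B never accumulates per-label values in a dict: it first computes the distinct labels in order of first occurrence (dict.fromkeys), then for each such label rescans the zipped pairs to collect and join its paragraphs, replacing A's single-pass dict accumulation with a distinct-keys pass plus per-key scans.
import Mathlib
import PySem

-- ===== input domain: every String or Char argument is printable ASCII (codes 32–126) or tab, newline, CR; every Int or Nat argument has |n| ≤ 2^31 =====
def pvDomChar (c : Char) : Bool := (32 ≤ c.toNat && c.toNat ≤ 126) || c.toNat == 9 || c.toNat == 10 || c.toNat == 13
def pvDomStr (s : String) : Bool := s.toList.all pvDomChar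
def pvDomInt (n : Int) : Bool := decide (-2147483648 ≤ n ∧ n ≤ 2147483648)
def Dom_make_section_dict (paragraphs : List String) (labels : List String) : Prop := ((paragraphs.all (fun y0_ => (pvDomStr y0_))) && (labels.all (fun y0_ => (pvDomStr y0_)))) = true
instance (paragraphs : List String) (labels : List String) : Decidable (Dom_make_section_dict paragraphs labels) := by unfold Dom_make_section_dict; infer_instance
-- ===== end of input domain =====

-- B replaces A's single-pass dict accumulation by a distinct-labels pass plus a per-label rescan of the pairs; same return value, different algorithm.

-- ===== PORT A =====
def make_section_dict (paragraphs : List String) (labels : List String) : List (String × String) :=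
  ((paragraphs.zip labels).foldl (fun section_dict pl =>
      if section_dict.contains pl.2 = false then
        section_dict.insert pl.2 pl.1
      else
        section_dict.insert pl.2 (section_dict.getD pl.2 "" ++ "\n\n" ++ pl.1))
    PySem.Dict.empty).items

-- ===== PORT B =====
-- list(dict.fromkeys(...)) = distinct labels in first-occurrence order = PySem.Set.ofList
def make_section_dict_alt (paragraphs : List String) (labels : List String) : List (String × String) :=
  let pairs := paragraphs.zip labels
  let order := PySem.Set.ofList (pairs.map (fun pl => pl.2))
  order.map (fun lab =>
    (lab, PySem.Str.join "\n\n" ((pairs.filter (fun pl => pl.2 == lab)).map (fun pl => pl.1))))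

-- ===== PRECONDITION & SPEC =====
def Spec_make_section_dict (paragraphs : List String) (labels : List String) (out : List (String × String)) : Prop := out = make_section_dict_alt paragraphs labels
instance (paragraphs : List String) (labels : List String) (out : List (String × String)) : Decidable (Spec_make_section_dict paragraphs labels out) := by unfold Spec_make_section_dict; infer_instance

-- ===== CLAIM (what is proved, stated in full; the proofs are below) =====
def Claim_equal_make_section_dict : Prop := ∀ (paragraphs : List String) (labels : List String), Dom_make_section_dict paragraphs labels → Spec_make_section_dict paragraphs labels (make_section_dict paragraphs labels)

-- ===== LEMMAS AND PROOFS =====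

-- A's loop step, named for the proofs
def pvStepA (d : PySem.Dict String String) (pl : String × String) : PySem.Dict String String :=
  if d.contains pl.2 = false then d.insert pl.2 pl.1
  else d.insert pl.2 (d.getD pl.2 "" ++ "\n\n" ++ pl.1)

def pvStepS (o : Option String) (p : String) : Option String :=
  some (match o with | none => p | some s => s ++ "\n\n" ++ p)

theorem pvStepA_eq_insert (d : PySem.Dict String String) (pl : String × String) :
    pvStepA d pl = d.insert pl.2 (match d.get? pl.2 with | none => pl.1 | some s => s ++ "\n\n" ++ pl.1) := by
  unfold pvStepA
  rcases h : d.get? pl.2 with _ | s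
  · have hc : d.contains pl.2 = false := by
      simp [PySem.Dict.contains_eq_isSome_get?, h]
    simp [hc]
  · have hc : d.contains pl.2 = true := by
      simp [PySem.Dict.contains_eq_isSome_get?, h]
    simp [hc, PySem.Dict.getD_eq_get?_getD, h]

-- the per-key invariant of A's fold
theorem pvFoldA_get? (l : List (String × String)) (d : PySem.Dict String String) (k : String) :
    (l.foldl pvStepA d).get? k =
      ((l.filter (fun pl => pl.2 == k)).map (·.1)).foldl pvStepS (d.get? k) := by
  induction l generalizing d with
  | nil => rfl
  | cons pl rest ih =>
    by_cases hk : pl.2 = k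
    · subst hk
      simp only [List.foldl_cons, List.filter_cons, BEq.rfl, if_true, List.map_cons, ih,
        pvStepA_eq_insert, PySem.Dict.get?_insert_self]
      rcases d.get? pl.2 with _ | s <;> rfl
    · have hb : (pl.2 == k) = false := by simp [hk]
      simp only [List.foldl_cons, List.filter_cons, hb, Bool.false_eq_true, if_false, ih,
        pvStepA_eq_insert, PySem.Dict.get?_insert]
      rw [if_neg (fun h => hk h.symm)]

theorem pvJoin_cons (sep a b : List Char) (l : List (List Char)) :
    PySem.Chars.join sep ((a ++ sep ++ b) :: l) = a ++ sep ++ PySem.Chars.join sep (b :: l) := by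
  cases l with
  | nil => simp [PySem.Chars.join_singleton]
  | cons c l' => simp [PySem.Chars.join_cons_cons, List.append_assoc]

-- folding pvStepS over a nonempty list is "\n\n".join
theorem pvFoldS_join (ps : List String) (s : String) :
    ps.foldl pvStepS (some s) = some (PySem.Str.join "\n\n" (s :: ps)) := by
  induction ps generalizing s with
  | nil =>
    simp
    apply String.ext
    simp [PySem.Str.join, PySem.Chars.join_singleton]
  | cons p rest ih =>
    simp only [List.foldl_cons, pvStepS, ih]
    congr 1
    apply String.ext
    simp only [PySem.Str.join]
    simpa [PySem.Chars.join_cons_cons] using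
      pvJoin_cons ['\n','\n'] s.toList p.toList (rest.map String.toList)

def pvValA (d : PySem.Dict String String) (pl : String × String) : String :=
  match d.get? pl.2 with | none => pl.1 | some s => s ++ "\n\n" ++ pl.1

theorem pvStepA_eq : pvStepA = fun d pl => d.insert pl.2 (pvValA d pl) :=
  funext fun d => funext fun pl => pvStepA_eq_insert d pl

theorem make_section_dict_spec : Claim_equal_make_section_dict := by
  intro paragraphs labels _
  show make_section_dict paragraphs labels = make_section_dict_alt paragraphs labels
  unfold make_section_dict make_section_dict_alt
  set l := paragraphs.zip labels with hl
  show (l.foldl pvStepA PySem.Dict.empty).items = _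
  set dA := l.foldl pvStepA PySem.Dict.empty with hdA
  have hnA : dA.keys.Nodup := by
    rw [hdA, pvStepA_eq]
    exact PySem.Dict.nodup_keys_foldl_insert_key l (fun pl => pl.2) pvValA _
      PySem.Dict.nodup_keys_empty
  have hkA : dA.keys = PySem.Set.ofList (l.map (fun pl => pl.2)) := by
    rw [hdA, pvStepA_eq, PySem.Dict.keys_foldl_insert_key]
    simp [PySem.Dict.keys_empty, PySem.Set.update_nil_left]
  rw [PySem.Dict.items_eq_map_keys dA hnA "", hkA]
  apply List.map_congr_left
  intro k hk
  have hkm : k ∈ l.map (fun pl => pl.2) := (PySem.Set.mem_ofList _ _).mp hk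
  obtain ⟨q, hq, hq2⟩ := List.mem_map.mp hkm
  have hne : (l.filter (fun pl => pl.2 == k)).map (·.1) ≠ [] := by
    simp only [ne_eq, List.map_eq_nil_iff, List.filter_eq_nil_iff, not_forall]
    exact ⟨q, hq, by simp [hq2]⟩
  rcases hcase : (l.filter (fun pl => pl.2 == k)).map (·.1) with _ | ⟨p, ps'⟩
  · exact absurd hcase hne
  have hA : dA.get? k = some (PySem.Str.join "\n\n" (p :: ps')) := by
    rw [hdA, pvFoldA_get?, PySem.Dict.get?_empty, hcase]
    simp only [List.foldl_cons]
    have : pvStepS none p = some p := rfl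
    rw [this, pvFoldS_join]
  have hgd : dA.getD k "" = PySem.Str.join "\n\n" (p :: ps') := by
    rw [PySem.Dict.getD_eq_get?_getD, hA]; rfl
  rw [hgd, hcase]
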